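-- pv_equiv track=rewrite | github.com/ygjin11/dtgg | annotate/obtain_best_traj.py | find_change_points
-- ===== SOURCE A (Python) =====
-- def find_change_points(sequence):
--     change_points = []
--     in_decreasing_sequence = False
--
--     for i in range(len(sequence) - 1):
--         if sequence[i] > sequence[i + 1]:
--             if not in_decreasing_sequence:
--                 in_decreasing_sequence = True
--                 change_points.append(i)
--         else:
--             in_decreasing_sequence = False
--
--     return change_points
-- ===== SOURCE B (Python) =====
-- def find_change_points(sequence):
--     dec = [sequence[i] > sequence[i + 1] for i in range(len(sequence) - 1)]
--     return [i for i in range(len(dec)) if dec[i] and (i == 0 or not dec[i - 1])]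
-- ===== Notes on version B (the rewrite author's own statement) =====
-- stated objective: alternative
-- what changed: Replaces A's single stateful flag-carrying loop with a two-phase derive-then-scan: first build an explicit boolean descent array, then collect indices where it rises from False to True.
import Mathlib
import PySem

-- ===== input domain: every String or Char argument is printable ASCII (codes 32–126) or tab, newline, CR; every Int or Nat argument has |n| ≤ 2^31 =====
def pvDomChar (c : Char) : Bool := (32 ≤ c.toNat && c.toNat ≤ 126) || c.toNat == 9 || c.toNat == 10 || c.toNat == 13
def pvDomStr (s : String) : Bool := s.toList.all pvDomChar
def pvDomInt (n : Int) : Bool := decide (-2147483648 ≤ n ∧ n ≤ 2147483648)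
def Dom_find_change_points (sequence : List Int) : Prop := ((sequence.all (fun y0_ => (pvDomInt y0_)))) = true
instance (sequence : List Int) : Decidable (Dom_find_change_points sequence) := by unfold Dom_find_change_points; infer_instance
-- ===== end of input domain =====

-- B derives an explicit boolean array of descents, then collects rising edges in a second pass,
-- replacing A's single stateful flag-carrying loop (alternative decomposition, same cost).


-- ===== PORT A =====
def find_change_points (sequence : List Int) : List Int :=
  (((PySem.List.pyRange 0 ((sequence.length : Int) - 1) 1).foldl
    (fun (st : List Int × Bool) i =>
      if PySem.List.pyGetD sequence i 0 > PySem.List.pyGetD sequence (i + 1) 0 then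
        if !st.2 then (st.1 ++ [i], true) else st
      else
        (st.1, false))
    ([], false)).1)

-- ===== PORT B =====
def find_change_points_alt (sequence : List Int) : List Int :=
  let dec : List Bool := (PySem.List.pyRange 0 ((sequence.length : Int) - 1) 1).map
    (fun i => decide (PySem.List.pyGetD sequence i 0 > PySem.List.pyGetD sequence (i + 1) 0))
  (PySem.List.pyRange 0 (dec.length : Int) 1).filter
    (fun i => PySem.List.pyGetD dec i false && (i == 0 || !PySem.List.pyGetD dec (i - 1) false))

-- ===== PRECONDITION & SPEC =====
def Spec_find_change_points (sequence : List Int) (out : List Int) : Prop := out = find_change_points_alt sequence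
instance (sequence : List Int) (out : List Int) : Decidable (Spec_find_change_points sequence out) := by unfold Spec_find_change_points; infer_instance

-- ===== CLAIM (what is proved, stated in full; the proofs are below) =====
def Claim_equal_find_change_points : Prop := ∀ (sequence : List Int), Dom_find_change_points sequence → Spec_find_change_points sequence (find_change_points sequence)

-- ===== LEMMAS AND PROOFS =====

-- the descent test at Nat index k
def pvG (s : List Int) (k : Nat) : Bool :=
  decide (PySem.List.pyGetD s (k : Int) 0 > PySem.List.pyGetD s ((k : Int) + 1) 0)

-- the flag A carries after processing indices 0..n-1
def pvFlag (s : List Int) (n : Nat) : Bool :=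
  match n with
  | 0 => false
  | m + 1 => pvG s m

-- B's rising-edge predicate at Nat index k
def pvP (s : List Int) (k : Nat) : Bool :=
  pvG s k && (k == 0 || !pvG s (k - 1))


-- A's fold over range n produces exactly B's filtered list, plus the flag
theorem pvCore (s : List Int) (n : Nat) :
    (List.range n).foldl
      (fun (st : List Int × Bool) (k : Nat) =>
        if pvG s k then (if !st.2 then (st.1 ++ [Int.ofNat k], true) else st)
        else (st.1, false))
      ([], false)
    = (((List.range n).filter (pvP s)).map Int.ofNat, pvFlag s n) := by
  induction n with
  | zero => simp [pvFlag]
  | succ m ih =>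
    rw [List.range_succ, List.foldl_append, ih, List.filter_append, List.map_append]
    simp only [List.foldl_cons, List.foldl_nil, List.filter_cons, List.filter_nil]
    by_cases hg : pvG s m
    · cases m with
      | zero => simp [pvFlag, pvP, hg]
      | succ j =>
        by_cases hf : pvG s j
        · simp [pvFlag, pvP, hg, hf]
        · simp [pvFlag, pvP, hg, hf]
    · simp [pvFlag, pvP, hg]

theorem pvA_eq (s : List Int) :
    find_change_points s
    = ((List.range (s.length - 1)).filter (pvP s)).map Int.ofNat := by
  unfold find_change_points
  cases s with
  | nil => simp [PySem.List.pyRange]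
  | cons a t =>
    have h1 : ((a :: t).length : Int) - 1 = ((t.length : Nat) : Int) := by
      simp
    rw [h1, PySem.List.pyRange_zero_natCast, List.foldl_map]
    have hfun : (fun (x : List Int × Bool) (y : Nat) =>
        if PySem.List.pyGetD (a :: t) (y : Int) 0 > PySem.List.pyGetD (a :: t) ((y : Int) + 1) 0 then
          if !x.2 then (x.1 ++ [((y : Nat) : Int)], true) else x
        else (x.1, false))
      = (fun (st : List Int × Bool) (k : Nat) =>
        if pvG (a :: t) k then (if !st.2 then (st.1 ++ [Int.ofNat k], true) else st)
        else (st.1, false)) := by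
      funext st k
      simp [pvG]
    rw [hfun, pvCore]
    simp

theorem pvDecGet (s : List Int) (n k : Nat) (hk : k < n) :
    PySem.List.pyGetD
      (List.map ((fun i => decide (PySem.List.pyGetD s i 0 > PySem.List.pyGetD s (i + 1) 0))
        ∘ (fun k : Nat => (k : Int))) (List.range n)) (k : Int) false
    = pvG s k := by
  rw [PySem.List.pyGetD_natCast, PySem.List.getD_map_range _ _ _ _ hk]
  simp [pvG]

theorem pvB_eq (s : List Int) :
    find_change_points_alt s
    = ((List.range (s.length - 1)).filter (pvP s)).map Int.ofNat := by
  unfold find_change_points_alt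
  cases s with
  | nil => simp [PySem.List.pyRange]
  | cons a t =>
    have h1 : ((a :: t).length : Int) - 1 = ((t.length : Nat) : Int) := by
      simp
    rw [h1, PySem.List.pyRange_zero_natCast]
    simp only [List.length_map, List.length_range]
    rw [PySem.List.pyRange_zero_natCast, List.filter_map, List.map_map]
    refine congrArg (List.map fun k : Nat => (k : Int)) ?_
    refine List.filter_congr ?_
    intro k hk
    have hkn : k < t.length := List.mem_range.mp hk
    simp only [Function.comp_apply]
    cases k with
    | zero =>
      rw [pvDecGet _ _ _ hkn]
      simp [pvP]
    | succ j =>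
      have hj : ((j + 1 : Nat) : Int) - 1 = ((j : Nat) : Int) := by push_cast; ring
      rw [pvDecGet _ _ _ hkn, hj, pvDecGet _ _ _ (by omega : j < t.length)]
      have h0 : ((j : Int) + 1 == 0) = false := by rw [beq_eq_false_iff_ne]; omega
      rw [Nat.cast_succ, h0]
      simp [pvP]

-- ===== VERDICT (by name: the statement is the Claim_ definition above) =====
theorem find_change_points_spec : Claim_equal_find_change_points := by
  intro s _
  unfold Spec_find_change_points
  rw [pvA_eq, pvB_eq]
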